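-- pv_equiv track=rewrite | github.com/okuvshynov/fewlines | py/fewlines/line.py | bar_multiline
-- ===== SOURCE A (Python) =====
-- bar_blocks =      [' ', '▁', '▂', '▃', '▄', '▅', '▆', '▇']
--
-- bar_blocks_full = [' ', '▁', '▂', '▃', '▄', '▅', '▆', '▇', '█']
--
-- def _clamp(v, a ,b):
--     return max(a, min(v, b))
--
-- def bar_multiline(y, n_lines=4, max_y=None, cells=bar_blocks_full, top_cells=bar_blocks):
--     if not y:
--         return "", 0
--
--     max_y = max(y) if max_y is None else max_y
--     if max_y == 0:
--         return [cells[0] * len(y) for _ in range(n_lines)], 0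
--     n_cells = len(cells)
--     n_top_cells = len(top_cells)
--
--     ##
--     # here's an example, imagine we have 3 blocks [' ', '▄', '█']
--     # we need to take into account the lower level '█' + upper level ' ' represent same value.
--     # Example with 4 layers:
--     #                                ' ', '▄'
--     #                      ' ', '▄', '█'
--     #            ' ', '▄', '█'
--     #  ' ', '▄', '█'
--     n_multicells = (n_lines - 1) * (n_cells - 1) + n_top_cells
--
--     multicell_idx = lambda v: _clamp(int(v * n_multicells / max_y), 0, n_multicells - 1)
--     idxs = [multicell_idx(v) for v in y]
--
--     res = []
--     for li in range(n_lines):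
--         # this is max possible value (index) representable by all layers below current
--         below = (n_cells - 1) * (n_lines - li - 1)
--         curr_cells = top_cells if li == 0 else cells
--         mind = len(curr_cells) - 1
--         res.append("".join([curr_cells[_clamp(idx - below, 0, mind)] for idx in idxs]))
--
--     return res, max_y
-- ===== SOURCE B (Python) =====
-- # B: column-major decomposition - build one cell-column per value, then transpose into rows.
-- bar_blocks =      [' ', '▁', '▂', '▃', '▄', '▅', '▆', '▇']
--
-- bar_blocks_full = [' ', '▁', '▂', '▃', '▄', '▅', '▆', '▇', '█']
--
-- def _clamp(v, a, b):
--     return max(a, min(v, b))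
--
-- def bar_multiline(y, n_lines=4, max_y=None, cells=bar_blocks_full, top_cells=bar_blocks):
--     if not y:
--         return "", 0
--     if max_y is None:
--         max_y = max(y)
--     if max_y == 0:
--         return [cells[0] * len(y) for _ in range(n_lines)], 0
--     n_cells = len(cells)
--     n_multicells = (n_lines - 1) * (n_cells - 1) + len(top_cells)
--     rows = max(n_lines, 0)
--     cols = []
--     for v in y:
--         idx = _clamp(int(v * n_multicells / max_y), 0, n_multicells - 1)
--         col = []
--         for li in range(rows):
--             cc = top_cells if li == 0 else cells
--             col.append(cc[_clamp(idx - (n_cells - 1) * (rows - li - 1), 0, len(cc) - 1)])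
--         cols.append(col)
--     return ["".join(row) for row in zip(*cols)], max_y
-- ===== Notes on version B (the rewrite author's own statement) =====
-- stated objective: alternative
-- what changed: B is column-major: for each value it builds the full column of cells (top cell first) in one pass, then transposes with zip(*cols) and joins each row, instead of A's row-major loop that re-scans the precomputed idxs once per line.
-- outside the precondition, e.g. on bar_multiline([], 4, None, [' '], [' ']): A returns ('', 0), B returns ('', 0)
import Mathlib
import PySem

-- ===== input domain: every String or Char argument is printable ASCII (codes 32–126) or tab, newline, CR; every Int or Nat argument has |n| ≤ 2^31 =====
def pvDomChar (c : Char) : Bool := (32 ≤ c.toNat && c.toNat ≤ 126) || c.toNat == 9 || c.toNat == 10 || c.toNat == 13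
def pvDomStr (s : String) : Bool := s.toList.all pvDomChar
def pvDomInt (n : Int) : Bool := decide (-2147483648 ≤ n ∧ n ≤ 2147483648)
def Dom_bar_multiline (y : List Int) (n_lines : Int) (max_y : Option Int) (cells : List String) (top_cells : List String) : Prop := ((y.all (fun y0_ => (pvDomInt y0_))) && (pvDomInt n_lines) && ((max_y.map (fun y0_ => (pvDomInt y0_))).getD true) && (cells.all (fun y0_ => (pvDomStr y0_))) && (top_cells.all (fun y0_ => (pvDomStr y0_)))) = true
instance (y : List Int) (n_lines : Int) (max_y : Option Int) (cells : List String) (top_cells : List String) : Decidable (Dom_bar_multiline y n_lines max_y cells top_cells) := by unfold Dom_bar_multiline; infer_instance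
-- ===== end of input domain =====

-- B changes the decomposition: one cell-column per value, then a transpose into rows (same cost as A).

-- shared module helper _clamp(v, a, b)
def pyClamp (v a b : Int) : Int := max a (min v b)

-- Python s * n for n = len(y) ≥ 0: exact — string repetition is the n-fold concatenation
def pyStrMul (s : String) (n : Nat) : String := PySem.Str.join "" (List.replicate n s)

-- effective max_y: the given one, or max(y) (first maximal element; y ≠ [] under Pre_)
def pvEffMax (y : List Int) (max_y : Option Int) : Int :=
  match max_y with
  | none => (PySem.List.max? y (fun v => v)).getD 0
  | some m => m

-- round-half-even of p/q (q > 0): IEEE-754 nearest-even tie rule on the scaled significand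
def rheNat (p q : Nat) : Nat :=
  let d := p / q
  let r := p % q
  if 2 * r < q then d else if q < 2 * r then d + 1 else if d % 2 = 0 then d else d + 1

-- trunc(double(a/b)) for a, b ≥ 1: normalise a/b to significand m ∈ [2^52, 2^53) times 2^(e-52)
-- with round-half-even, then truncate — the binary64 double CPython's int/int true division
-- produces, followed by int(); exact below the double overflow threshold (excluded by Pre_)
def pyDivTruncNat (a b : Nat) : Nat :=
  let e0 : Int := (Nat.log2 a : Int) - (Nat.log2 b : Int)
  let le : Bool := if 0 ≤ e0 then decide (b * 2 ^ e0.toNat ≤ a) else decide (b ≤ a * 2 ^ (-e0).toNat)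
  let e : Int := if le then e0 else e0 - 1
  let p : Nat := if e ≤ 52 then a * 2 ^ (52 - e).toNat else a
  let q : Nat := if e ≤ 52 then b else b * 2 ^ (e - 52).toNat
  let m : Nat := rheNat p q
  let m2 : Nat := if m = 2 ^ 53 then 2 ^ 52 else m
  let e2 : Int := if m = 2 ^ 53 then e + 1 else e
  if 52 ≤ e2 then m2 * 2 ^ (e2 - 52).toNat else m2 / 2 ^ (52 - e2).toNat

-- hand port of Python's int(a / b) for b ≠ 0 (correctly rounded float division, then truncation
-- toward zero); signs split off since both operations are sign-symmetric
def pyFloatDivTrunc (a b : Int) : Int :=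
  if a = 0 then 0
  else
    let n : Int := pyDivTruncNat a.natAbs b.natAbs
    if decide (a < 0) = decide (b < 0) then n else -n

-- ===== PORT A =====
def bar_multiline (y : List Int) (n_lines : Int) (max_y : Option Int) (cells : List String) (top_cells : List String) : List String × Int :=
  if y = [] then ([], 0)  -- Python returns ("", 0): "" is not a List String; excluded by Pre_
  else
    let max_y' : Int := pvEffMax y max_y
    if max_y' = 0 then
      ((PySem.List.pyRange 0 n_lines 1).map (fun _ => pyStrMul (PySem.List.pyGetD cells 0 "") y.length), 0)
    else
      let n_cells : Int := cells.length
      let n_top_cells : Int := top_cells.length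
      let n_multicells : Int := (n_lines - 1) * (n_cells - 1) + n_top_cells
      let idxs := y.map (fun v => pyClamp (pyFloatDivTrunc (v * n_multicells) max_y') 0 (n_multicells - 1))
      let res := (PySem.List.pyRange 0 n_lines 1).foldl (fun res li =>
        let below := (n_cells - 1) * (n_lines - li - 1)
        let curr_cells := if li = 0 then top_cells else cells
        let mind : Int := (curr_cells.length : Int) - 1
        res ++ [PySem.Str.join "" (idxs.map (fun idx => PySem.List.pyGetD curr_cells (pyClamp (idx - below) 0 mind) ""))]) []
      (res, max_y')

-- ===== PORT B =====
-- zip(*cols): tuples while every column still has an element (all columns have equal length here)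
def pvZip : List (List String) → List (List String)
  | [] => []
  | [] :: _ => []
  | (x :: c) :: cs =>
    if cs.all (fun l => !l.isEmpty)
    then (x :: cs.map (fun l => l.headD "")) :: pvZip (c :: cs.map (fun l => l.tail))
    else []
termination_by cols => (cols.headD []).length
decreasing_by simp

def bar_multiline_alt (y : List Int) (n_lines : Int) (max_y : Option Int) (cells : List String) (top_cells : List String) : List String × Int :=
  if y = [] then ([], 0)
  else
    let max_y' : Int := pvEffMax y max_y
    if max_y' = 0 then
      ((PySem.List.pyRange 0 n_lines 1).map (fun _ => pyStrMul (PySem.List.pyGetD cells 0 "") y.length), 0)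
    else
      let n_cells : Int := cells.length
      let n_multicells : Int := (n_lines - 1) * (n_cells - 1) + (top_cells.length : Int)
      let rows : Int := max n_lines 0
      let cols := y.foldl (fun cols v =>
        let idx := pyClamp (pyFloatDivTrunc (v * n_multicells) max_y') 0 (n_multicells - 1)
        let col := (PySem.List.pyRange 0 rows 1).map (fun li =>
          let cc := if li = 0 then top_cells else cells
          PySem.List.pyGetD cc (pyClamp (idx - (n_cells - 1) * (rows - li - 1)) 0 ((cc.length : Int) - 1)) "")
        cols ++ [col]) []
      ((pvZip cols).map (fun row => PySem.Str.join "" row), max_y')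

-- ===== PRECONDITION & SPEC =====
-- Pre_ excludes exactly the inputs where A's return is not a value of the claimed type or A raises:
-- y = [] (A returns ("", 0) — a str, not a list of row strings); the empty-cells shapes on which the
-- indexing cells[0] / curr_cells[…] raises IndexError; and values whose quotient v*n_multicells/max_y
-- reaches the binary64 overflow threshold 2^1024 - 2^970 (the literal below), where int() raises
-- OverflowError.
def Pre_bar_multiline (y : List Int) (n_lines : Int) (max_y : Option Int) (cells : List String) (top_cells : List String) : Prop :=
  y ≠ [] ∧
  (pvEffMax y max_y = 0 → 1 ≤ n_lines → cells ≠ []) ∧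
  (pvEffMax y max_y ≠ 0 →
    (1 ≤ n_lines → top_cells ≠ [] ∧ (2 ≤ n_lines → cells ≠ [])) ∧
    ∀ v ∈ y, |v * ((n_lines - 1) * ((cells.length : Int) - 1) + (top_cells.length : Int))| <
      179769313486231580793728971405303415079934132710037826936173778980444968292764750946649017977587207096330286416692887910946555547851940402630657488671505820681908902000708383676273854845817711531764475730270069855571366959622842914819860834936475292719074168444365510704342711559699508093042880177904174497792 * |pvEffMax y max_y|)
instance (y : List Int) (n_lines : Int) (max_y : Option Int) (cells : List String) (top_cells : List String) : Decidable (Pre_bar_multiline y n_lines max_y cells top_cells) := by unfold Pre_bar_multiline; infer_instance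

def pvWitness_bar_multiline : List Int × Int × Option Int × List String × List String :=
  ([3, -1, 7], 2, none, [" ", "-", "#"], [" ", "-"])

def Spec_bar_multiline (y : List Int) (n_lines : Int) (max_y : Option Int) (cells : List String) (top_cells : List String) (out : List String × Int) : Prop := out = bar_multiline_alt y n_lines max_y cells top_cells
instance (y : List Int) (n_lines : Int) (max_y : Option Int) (cells : List String) (top_cells : List String) (out : List String × Int) : Decidable (Spec_bar_multiline y n_lines max_y cells top_cells out) := by unfold Spec_bar_multiline; infer_instance

-- ===== CLAIM (what is proved, stated in full; the proofs are below) =====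
def Claim_equal_bar_multiline : Prop := ∀ (y : List Int) (n_lines : Int) (max_y : Option Int) (cells : List String) (top_cells : List String), Dom_bar_multiline y n_lines max_y cells top_cells → Pre_bar_multiline y n_lines max_y cells top_cells → Spec_bar_multiline y n_lines max_y cells top_cells (bar_multiline y n_lines max_y cells top_cells)

-- ===== LEMMAS AND PROOFS =====

-- pvZip of a nonempty list of equal-shape columns is the row-major transposition
lemma pvZip_map_map {α : Type} (r : List Int) (y : List α) (f : α → Int → String) (hy : y ≠ []) :
    pvZip (y.map (fun v => r.map (f v))) = r.map (fun li => y.map (fun v => f v li)) := by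
  induction r generalizing y with
  | nil =>
    obtain ⟨a, ys, rfl⟩ := List.exists_cons_of_ne_nil hy
    simp [pvZip]
  | cons i r' ih =>
    obtain ⟨a, ys, rfl⟩ := List.exists_cons_of_ne_nil hy
    simp only [List.map_cons]
    rw [pvZip]
    have hall : (ys.map (fun v => f v i :: r'.map (f v))).all (fun l => !l.isEmpty) = true := by
      simp [List.all_eq_true]
    rw [if_pos hall]
    have := ih (a :: ys) (by simp)
    simp only [List.map_cons] at this
    simp only [List.map_map, Function.comp_def, List.headD, List.tail]
    rw [this]

theorem bar_multiline_eq (y : List Int) (n_lines : Int) (max_y : Option Int) (cells : List String) (top_cells : List String) :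
    bar_multiline y n_lines max_y cells top_cells = bar_multiline_alt y n_lines max_y cells top_cells := by
  unfold bar_multiline bar_multiline_alt
  by_cases hy : y = []
  · simp [hy]
  · rw [if_neg hy, if_neg hy]
    by_cases hM : pvEffMax y max_y = 0
    · simp [hM]
    · rw [if_neg hM, if_neg hM]
      simp only [PySem.List.foldl_append_singleton_eq_map]
      refine Prod.ext ?_ rfl
      by_cases hn : n_lines ≤ 0
      · -- no rows: both sides are []
        rw [PySem.List.pyRange_one_eq_nil (by omega : n_lines ≤ 0),
            PySem.List.pyRange_one_eq_nil (by omega : max n_lines 0 ≤ 0)]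
        obtain ⟨a, ys, rfl⟩ := List.exists_cons_of_ne_nil hy
        simp [pvZip]
      · -- n_lines ≥ 1: rows = n_lines, transpose lemma
        have hr : max n_lines 0 = n_lines := by omega
        rw [hr]
        have key := pvZip_map_map (PySem.List.pyRange 0 n_lines 1) y
          (fun v li =>
            PySem.List.pyGetD (if li = 0 then top_cells else cells)
              (pyClamp
                (pyClamp
                    (pyFloatDivTrunc (v * ((n_lines - 1) * ((cells.length : Int) - 1) + (top_cells.length : Int)))
                      (pvEffMax y max_y))
                    0 ((n_lines - 1) * ((cells.length : Int) - 1) + (top_cells.length : Int) - 1) -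
                  ((cells.length : Int) - 1) * (n_lines - li - 1))
                0 (((if li = 0 then top_cells else cells).length : Int) - 1))
              "") hy
        simp only [List.nil_append]
        rw [key]
        simp [List.map_map, Function.comp_def]

-- ===== VERDICT (by name: the statement is the Claim_ definition above) =====
theorem bar_multiline_spec : Claim_equal_bar_multiline := by
  intro y n_lines max_y cells top_cells _ _
  unfold Spec_bar_multiline
  exact bar_multiline_eq y n_lines max_y cells top_cells
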